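-- pv_equiv track=rewrite | github.com/Nick806/py-Battleship | Battleship.py | get_remaining_ships
-- ===== SOURCE A (Python) =====
-- def create_table(rows, columns, elements):
--     """
--     Creates a 2D table (list of lists) with the specified number of rows and columns,
--     filling each cell with the provided elements.
--
--     Parameters:
--     - rows (int): The number of rows in the table.
--     - columns (int): The number of columns in the table.
--     - elements: The value to be placed in each cell of the table.
--
--     Returns:
--     - list: A 2D table represented as a list of lists.
--     """
--     table = [[elements for _ in range(columns)] for _ in range(rows)]
--     return table
--
-- def count_element_in_table(table, element):
--     """
--     Returns the number of times an element is contained in a table.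
--
--     Parameters:
--     - table (list): The table in which to count occurrences of the element.
--     - element: The element to count.
--
--     Returns:
--     - int: The count of occurrences of the specified element in the table.
--     """
--     count = 0
--
--     for row in table:
--         count += row.count(element)
--
--     return count
--
-- def get_remaining_ships(attack_table, ship_positioning_table, ships):
--     """
--     Retrieves the list of remaining ships based on the current state of the game.
--
--     Parameters:
--     - attack_table (list): The table representing the state of attacks, where "O" denotes an unattacked position.
--     - ship_positioning_table (list): The table representing the positions of ships, where 0 denotes an empty position.
--     - ships (list): The list of all ships in the game.
--
--     Returns:
--     - list: A list containing the names of the remaining ships based on the current state of the game.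
--     """
--     # Contains all the remaining parts to be hit
--     remaining_pieces = create_table(len(attack_table), len(attack_table[0]), 0)
--
--     # Compare the two tables
--     for row in range(len(remaining_pieces)):
--         for col in range(len(remaining_pieces[0])):
--             if attack_table[row][col] == "O":
--                 remaining_pieces[row][col] = ship_positioning_table[row][col]
--
--     remaining_ships = []
--     for ship_index in range(len(ships)):
--         if count_element_in_table(remaining_pieces, ship_index + 1) > 0:
--             remaining_ships.append(ships[ship_index])
--
--     return remaining_ships
-- ===== SOURCE B (Python) =====
-- def get_remaining_ships(attack_table, ship_positioning_table, ships):
--     # One pass over the grid collecting the set of surviving ship numbers,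
--     # then one pass filtering the ship list in order.
--     cols = len(attack_table[0])
--     alive = set()
--     for row, attack_row in enumerate(attack_table):
--         for col in range(cols):
--             if attack_row[col] == "O":
--                 alive.add(ship_positioning_table[row][col])
--     return [ship for index, ship in enumerate(ships) if index + 1 in alive]
-- ===== Notes on version B (the rewrite author's own statement) =====
-- stated objective: faster
-- what changed: Instead of materialising a zero-filled 'remaining pieces' grid and rescanning the whole grid once per ship to count its pieces, B walks the grid once collecting the set of surviving ship numbers and then filters the ship list in order.
import Mathlib
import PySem

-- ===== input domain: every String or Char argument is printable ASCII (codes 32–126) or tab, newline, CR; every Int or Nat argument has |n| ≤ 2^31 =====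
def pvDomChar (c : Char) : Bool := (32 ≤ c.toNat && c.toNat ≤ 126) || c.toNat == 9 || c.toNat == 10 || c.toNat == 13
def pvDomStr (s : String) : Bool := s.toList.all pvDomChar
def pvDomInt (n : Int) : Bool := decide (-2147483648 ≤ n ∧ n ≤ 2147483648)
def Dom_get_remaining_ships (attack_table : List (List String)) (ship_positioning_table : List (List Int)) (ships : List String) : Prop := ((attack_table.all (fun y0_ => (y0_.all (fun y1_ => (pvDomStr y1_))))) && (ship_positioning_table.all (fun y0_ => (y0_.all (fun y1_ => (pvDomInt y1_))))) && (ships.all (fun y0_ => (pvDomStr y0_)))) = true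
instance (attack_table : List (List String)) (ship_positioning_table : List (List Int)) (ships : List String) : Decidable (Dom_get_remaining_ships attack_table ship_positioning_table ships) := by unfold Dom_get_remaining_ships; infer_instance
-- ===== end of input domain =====

-- B replaces A's per-ship rescans of a materialised "remaining pieces" grid by one grid pass
-- collecting the set of surviving ship numbers (asymptotically faster: O(R*C + ships) vs O(ships*R*C)).

-- ===== PORT A =====
-- create_table(rows, columns, elements)
def create_table (rows columns : Nat) (elements : Int) : List (List Int) :=
  List.replicate rows (List.replicate columns elements)

-- count_element_in_table(table, element)
def count_element_in_table (table : List (List Int)) (element : Int) : Int :=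
  table.foldl (fun count row => count + (row.count element : Int)) 0

def get_remaining_ships (attack_table : List (List String)) (ship_positioning_table : List (List Int)) (ships : List String) : List String :=
  let rows := attack_table.length
  let cols := (attack_table.getD 0 []).length
  -- remaining_pieces = create_table(len(attack_table), len(attack_table[0]), 0), then the nested in-place update loop
  let remaining_pieces :=
    (List.range rows).foldl (fun tbl row =>
      (List.range cols).foldl (fun tbl col =>
        if (attack_table.getD row []).getD col "" == "O" then
          tbl.set row ((tbl.getD row []).set col ((ship_positioning_table.getD row []).getD col 0))
        else tbl) tbl)
      (create_table rows cols 0)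
  (List.range ships.length).foldl (fun acc (ship_index : Nat) =>
    if 0 < count_element_in_table remaining_pieces ((ship_index : Int) + 1) then
      acc ++ [ships.getD ship_index ""]
    else acc) []

-- ===== PORT B =====
def get_remaining_ships_alt (attack_table : List (List String)) (ship_positioning_table : List (List Int)) (ships : List String) : List String :=
  let cols := (attack_table.getD 0 []).length
  let alive : PySem.Set Int :=
    (PySem.List.enumerate attack_table).foldl (fun s p =>
      (List.range cols).foldl (fun s col =>
        if p.2.getD col "" == "O" then
          PySem.Set.add s ((PySem.List.pyGetD ship_positioning_table p.1 []).getD col 0)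
        else s) s)
      PySem.Set.empty
  ((PySem.List.enumerate ships).filter (fun q => PySem.Set.contains alive (q.1 + 1))).map (·.2)

-- ===== PRECONDITION & SPEC =====
-- Pre_ excludes exactly the inputs where the Python raises IndexError: empty attack_table
-- (attack_table[0]), an attack row shorter than the first one, or a missing/short
-- ship_positioning_table row at a cell that is still "O".
def Pre_get_remaining_ships (attack_table : List (List String)) (ship_positioning_table : List (List Int)) (ships : List String) : Prop :=
  attack_table ≠ [] ∧
  ∀ r < attack_table.length, ∀ c < (attack_table.getD 0 []).length,
    c < (attack_table.getD r []).length ∧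
    ((attack_table.getD r []).getD c "" = "O" →
      r < ship_positioning_table.length ∧ c < (ship_positioning_table.getD r []).length)
instance (attack_table : List (List String)) (ship_positioning_table : List (List Int)) (ships : List String) : Decidable (Pre_get_remaining_ships attack_table ship_positioning_table ships) := by unfold Pre_get_remaining_ships; infer_instance

def pvWitness_get_remaining_ships : List (List String) × List (List Int) × List String :=
  ([["O", "X"], ["O", "O"]], [[1, 0], [2, 2]], ["destroyer", "cruiser"])

def Spec_get_remaining_ships (attack_table : List (List String)) (ship_positioning_table : List (List Int)) (ships : List String) (out : List String) : Prop := out = get_remaining_ships_alt attack_table ship_positioning_table ships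
instance (attack_table : List (List String)) (ship_positioning_table : List (List Int)) (ships : List String) (out : List String) : Decidable (Spec_get_remaining_ships attack_table ship_positioning_table ships out) := by unfold Spec_get_remaining_ships; infer_instance

-- ===== CLAIM (what is proved, stated in full; the proofs are below) =====
def Claim_equal_get_remaining_ships : Prop := ∀ (attack_table : List (List String)) (ship_positioning_table : List (List Int)) (ships : List String), Dom_get_remaining_ships attack_table ship_positioning_table ships → Pre_get_remaining_ships attack_table ship_positioning_table ships → Spec_get_remaining_ships attack_table ship_positioning_table ships (get_remaining_ships attack_table ship_positioning_table ships)

-- ===== LEMMAS AND PROOFS =====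

-- literal copies of the two folds the ports bind with 'let' (proof-side names)
def rpA (A : List (List String)) (S : List (List Int)) : List (List Int) :=
  (List.range A.length).foldl (fun tbl row =>
    (List.range (A.getD 0 []).length).foldl (fun tbl col =>
      if (A.getD row []).getD col "" == "O" then
        tbl.set row ((tbl.getD row []).set col ((S.getD row []).getD col 0))
      else tbl) tbl)
    (create_table A.length (A.getD 0 []).length 0)

def aliveB (A : List (List String)) (S : List (List Int)) : PySem.Set Int :=
  (PySem.List.enumerate A).foldl (fun s p =>
    (List.range (A.getD 0 []).length).foldl (fun s col =>
      if p.2.getD col "" == "O" then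
        PySem.Set.add s ((PySem.List.pyGetD S p.1 []).getD col 0)
      else s) s) PySem.Set.empty

theorem portA_eq (A : List (List String)) (S : List (List Int)) (ships : List String) :
    get_remaining_ships A S ships
      = (List.range ships.length).foldl (fun acc (i : Nat) =>
          if 0 < count_element_in_table (rpA A S) ((i : Int) + 1) then acc ++ [ships.getD i ""] else acc) [] := rfl

theorem portB_eq (A : List (List String)) (S : List (List Int)) (ships : List String) :
    get_remaining_ships_alt A S ships
      = ((PySem.List.enumerate ships).filter (fun q => PySem.Set.contains (aliveB A S) (q.1 + 1))).map (·.2) := rfl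

-- the guarded inner loop only touches row r: it is a set of that row
theorem inner_lift (p : Nat → Bool) (g : Nat → Int) (r : Nat) (L : List Nat)
    (tbl : List (List Int)) (hr : r < tbl.length) :
    L.foldl (fun t c => if p c then t.set r ((t.getD r []).set c (g c)) else t) tbl
      = tbl.set r (L.foldl (fun row c => if p c then row.set c (g c) else row) (tbl.getD r [])) := by
  induction L generalizing tbl with
  | nil =>
    simp only [List.foldl_nil]
    rw [List.getD_eq_getElem _ _ hr, List.set_getElem_self]
  | cons c t ih =>
    simp only [List.foldl_cons]
    by_cases hp : p c
    · rw [if_pos hp, if_pos hp, ih _ (by simpa using hr)]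
      have h1 : (tbl.set r ((tbl.getD r []).set c (g c))).getD r [] = (tbl.getD r []).set c (g c) := by
        rw [List.getD_eq_getElem _ _ (by simpa using hr), List.getElem_set_self (by simpa using hr)]
      rw [h1, List.set_set]
    · rw [if_neg hp, if_neg hp, ih _ hr]

theorem table_step_length (p : Nat → Bool) (g : Nat → Int) (r : Nat) (M : List Nat)
    (tbl : List (List Int)) :
    (M.foldl (fun t c => if p c then t.set r ((t.getD r []).set c (g c)) else t) tbl).length
      = tbl.length := by
  induction M generalizing tbl with
  | nil => rfl
  | cons c t ih =>
    simp only [List.foldl_cons]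
    by_cases hp : p c
    · rw [if_pos hp, ih, List.length_set]
    · rw [if_neg hp, ih]

theorem table_fold_length (p : Nat → Nat → Bool) (g : Nat → Nat → Int) (M : List Nat)
    (L : List Nat) (tbl : List (List Int)) :
    (L.foldl (fun t r => M.foldl (fun t c => if p r c then t.set r ((t.getD r []).set c (g r c)) else t) t) tbl).length
      = tbl.length := by
  induction L generalizing tbl with
  | nil => rfl
  | cons x t ih => rw [List.foldl_cons, ih, table_step_length]

-- the whole double loop, row by row: each row is written once, from its original content
theorem table_fold_getD (p : Nat → Nat → Bool) (g : Nat → Nat → Int) (M : List Nat)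
    (L : List Nat) (tbl : List (List Int)) (hnd : L.Nodup) (hlt : ∀ x ∈ L, x < tbl.length) (j : Nat) :
    (L.foldl (fun t r => M.foldl (fun t c => if p r c then t.set r ((t.getD r []).set c (g r c)) else t) t) tbl).getD j []
      = if j ∈ L then M.foldl (fun row c => if p j c then row.set c (g j c) else row) (tbl.getD j [])
        else tbl.getD j [] := by
  induction L generalizing tbl with
  | nil => simp
  | cons x t ih =>
    have hx : x < tbl.length := hlt x (by simp)
    obtain ⟨hxt, hnd'⟩ := List.nodup_cons.mp hnd
    rw [List.foldl_cons, inner_lift (p x) (g x) x M tbl hx]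
    have hlt' : ∀ y ∈ t, y < (tbl.set x (M.foldl (fun row c => if p x c then row.set c (g x c) else row) (tbl.getD x []))).length := by
      intro y hy; simpa using hlt y (by simp [hy])
    rw [ih _ hnd' hlt']
    by_cases hj : j = x
    · subst hj
      simp [hxt, List.getD_eq_getElem?_getD, hx]
    · simp [hj, List.getD_eq_getElem?_getD, List.getElem?_set_ne (fun h => hj h.symm)]

-- the inner loop with a guard: cell c gets g c iff c was visited and the guard holds
theorem foldl_set_if_getD {α : Type} (p : Nat → Bool) (g : Nat → α) (d : α) (L : List Nat) (xs : List α)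
    (hnd : L.Nodup) (hlt : ∀ x ∈ L, x < xs.length) (j : Nat) :
    ((L.foldl (fun ys c => if p c then ys.set c (g c) else ys) xs).getD j d)
      = if j ∈ L ∧ p j then g j else xs.getD j d := by
  induction L generalizing xs with
  | nil => simp
  | cons x t ih =>
    have hnd' := (List.nodup_cons.mp hnd).2
    have hxt := (List.nodup_cons.mp hnd).1
    have hx : x < xs.length := hlt x (by simp)
    have hlt' : ∀ y ∈ t, y < (if p x then xs.set x (g x) else xs).length := by
      intro y hy
      by_cases hp : p x <;> simpa [hp] using hlt y (by simp [hy])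
    rw [List.foldl_cons, ih _ hnd' hlt']
    by_cases hj : j = x
    · subst hj
      by_cases hp : p j <;>
        simp [hp, hxt, List.getD_eq_getElem?_getD, hx]
    · by_cases hp : p x <;>
        simp [hp, hj, List.getD_eq_getElem?_getD, List.getElem?_set_ne (fun h => hj h.symm)]

theorem foldl_set_if_length {α : Type} (p : Nat → Bool) (g : Nat → α) (L : List Nat) (xs : List α) :
    (L.foldl (fun ys c => if p c then ys.set c (g c) else ys) xs).length = xs.length := by
  induction L generalizing xs with
  | nil => rfl
  | cons x t ih => by_cases hp : p x <;> simp [List.foldl_cons, hp, ih]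

-- membership in a guarded Set.add fold
theorem mem_foldl_set_add {α β : Type} [BEq α] [LawfulBEq α] (p : β → Bool) (w : β → α)
    (L : List β) (s : PySem.Set α) (x : α) :
    (x ∈ L.foldl (fun s y => if p y then PySem.Set.add s (w y) else s) s)
      ↔ x ∈ s ∨ ∃ y ∈ L, p y ∧ w y = x := by
  induction L generalizing s with
  | nil => simp
  | cons a t ih =>
    rw [List.foldl_cons]
    by_cases hp : p a
    · rw [if_pos hp, ih]
      simp only [PySem.Set.mem_add, List.mem_cons]
      aesop
    · rw [if_neg hp, ih]
      simp only [List.mem_cons]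
      aesop


theorem mem_foldl_foldl_set_add {α β γ : Type} [BEq α] [LawfulBEq α] (p : β → γ → Bool) (w : β → γ → α)
    (L : List β) (M : List γ) (s : PySem.Set α) (x : α) :
    (x ∈ L.foldl (fun s y => M.foldl (fun s z => if p y z then PySem.Set.add s (w y z) else s) s) s)
      ↔ x ∈ s ∨ ∃ y ∈ L, ∃ z ∈ M, p y z ∧ w y z = x := by
  induction L generalizing s with
  | nil => simp
  | cons a t ih =>
    rw [List.foldl_cons, ih, mem_foldl_set_add]
    simp only [List.mem_cons]
    aesop

theorem count_rpA_pos_iff (A : List (List String)) (S : List (List Int)) (v : Int) (hv : v ≠ 0) :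
    (0 < count_element_in_table (rpA A S) v)
      ↔ ∃ r < A.length, ∃ c < (A.getD 0 []).length,
          ((A.getD r []).getD c "" == "O") = true ∧ (S.getD r []).getD c 0 = v := by
  have hlen : (rpA A S).length = A.length := by
    rw [rpA, table_fold_length (p := fun r c => (A.getD r []).getD c "" == "O")
      (g := fun r c => (S.getD r []).getD c 0)]
    simp [create_table]
  -- each row of rpA
  have hrow : ∀ j, j < A.length →
      (rpA A S).getD j []
        = (List.range (A.getD 0 []).length).foldl
            (fun row c => if (A.getD j []).getD c "" == "O" then row.set c ((S.getD j []).getD c 0) else row)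
            (List.replicate (A.getD 0 []).length 0) := by
    intro j hj
    rw [rpA, table_fold_getD (p := fun r c => (A.getD r []).getD c "" == "O")
      (g := fun r c => (S.getD r []).getD c 0) _ _ _ (List.nodup_range)
      (by intro x hx; simpa [create_table] using List.mem_range.mp hx)]
    rw [if_pos (List.mem_range.mpr hj)]
    congr 1
    rw [create_table, List.getD_eq_getElem _ _ (by simpa using hj)]
    simp
  -- count positive iff some row contains v
  have hcnt : (0 < count_element_in_table (rpA A S) v) ↔ ∃ row ∈ rpA A S, v ∈ row := by
    rw [count_element_in_table, PySem.List.foldl_add (g := fun row : List Int => (row.count v : Int)), zero_add]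
    rw [show (rpA A S).map (fun row : List Int => ((row.count v : Nat) : Int))
          = ((rpA A S).map (fun row => row.count v)).map (Nat.cast : Nat → Int) by rw [List.map_map]; rfl]
    rw [← Nat.cast_list_sum]
    rw [Int.natCast_pos, List.sum_pos_iff_exists_pos_nat]
    simp [List.count_pos_iff]
  rw [hcnt]
  have hnd := List.nodup_range (n := (A.getD 0 []).length)
  constructor
  · rintro ⟨row, hrow_mem, hvrow⟩
    obtain ⟨j, hj, rfl⟩ := List.mem_iff_getElem.mp hrow_mem
    have hj' : j < A.length := hlen ▸ hj
    rw [← List.getD_eq_getElem _ [] hj, hrow j hj'] at hvrow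
    obtain ⟨c, hc, hcv⟩ := List.mem_iff_getElem.mp hvrow
    have hL := foldl_set_if_length (p := fun c => (A.getD j []).getD c "" == "O")
      (g := fun c => (S.getD j []).getD c 0)
      (List.range (A.getD 0 []).length) (List.replicate (A.getD 0 []).length 0)
    have hclen : c < (A.getD 0 []).length := by
      rw [hL, List.length_replicate] at hc; exact hc
    rw [← List.getD_eq_getElem _ 0 hc,
      foldl_set_if_getD _ _ _ _ _ hnd (by intro x hx; simpa using List.mem_range.mp hx)] at hcv
    by_cases hP : ((A.getD j []).getD c "" == "O") = true
    · rw [if_pos ⟨List.mem_range.mpr hclen, hP⟩] at hcv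
      exact ⟨j, hj', c, hclen, hP, hcv⟩
    · exfalso
      rw [if_neg (fun h => hP h.2)] at hcv
      apply hv
      rw [← hcv, List.getD_eq_getElem?_getD, List.getElem?_replicate]
      split <;> rfl
  · rintro ⟨r, hr, c, hc, hP, hG⟩
    refine ⟨(rpA A S).getD r [], ?_, ?_⟩
    · rw [List.getD_eq_getElem _ _ (by omega : r < (rpA A S).length)]
      exact List.getElem_mem _
    · rw [hrow r hr]
      have hL := foldl_set_if_length (p := fun c => (A.getD r []).getD c "" == "O")
        (g := fun c => (S.getD r []).getD c 0)
        (List.range (A.getD 0 []).length) (List.replicate (A.getD 0 []).length 0)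
      have hclen2 : c < ((List.range (A.getD 0 []).length).foldl
          (fun row c => if (A.getD r []).getD c "" == "O" then row.set c ((S.getD r []).getD c 0) else row)
          (List.replicate (A.getD 0 []).length 0)).length := by
        rw [hL, List.length_replicate]; exact hc
      have hval : ((List.range (A.getD 0 []).length).foldl
          (fun row c => if (A.getD r []).getD c "" == "O" then row.set c ((S.getD r []).getD c 0) else row)
          (List.replicate (A.getD 0 []).length 0)).getD c 0 = v := by
        rw [foldl_set_if_getD _ _ _ _ _ hnd (by intro x hx; simpa using List.mem_range.mp hx),
          if_pos ⟨List.mem_range.mpr hc, hP⟩]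
        exact hG
      rw [← hval, List.getD_eq_getElem _ _ hclen2]
      exact List.getElem_mem _

theorem mem_aliveB_iff (A : List (List String)) (S : List (List Int)) (v : Int) :
    v ∈ aliveB A S
      ↔ ∃ r < A.length, ∃ c < (A.getD 0 []).length,
          ((A.getD r []).getD c "" == "O") = true ∧ (S.getD r []).getD c 0 = v := by
  have H := mem_foldl_foldl_set_add (p := fun (y : Int × List String) c => y.2.getD c "" == "O")
      (w := fun y c => (PySem.List.pyGetD S y.1 []).getD c 0)
      (PySem.List.enumerate A) (List.range (A.getD 0 []).length) PySem.Set.empty v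
  unfold aliveB
  refine H.trans ?_
  simp only [PySem.Set.empty, List.not_mem_nil, false_or, PySem.List.mem_enumerate_iff, List.mem_range]
  constructor
  · rintro ⟨y, ⟨k, hk, rfl⟩, c, hc, h1, h2⟩
    refine ⟨k, hk, c, hc, ?_, ?_⟩
    · simpa [List.getD_eq_getElem?_getD, List.getElem?_eq_getElem, hk] using h1
    · simpa [PySem.List.pyGetD_natCast] using h2
  · rintro ⟨r, hr, c, hc, h1, h2⟩
    refine ⟨((0 : Int) + r, A[r]), ⟨r, hr, rfl⟩, c, hc, ?_, ?_⟩
    · simpa [List.getD_eq_getElem?_getD, List.getElem?_eq_getElem, hr] using h1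
    · simpa [PySem.List.pyGetD_natCast] using h2

-- ===== VERDICT (by name: the statement is the Claim_ definition above) =====
theorem get_remaining_ships_spec : Claim_equal_get_remaining_ships := by
  intro A S ships _ _
  unfold Spec_get_remaining_ships
  rw [portA_eq, portB_eq]
  have hkey : ∀ i : Nat,
      (0 < count_element_in_table (rpA A S) ((i : Int) + 1)) ↔ ((i : Int) + 1) ∈ aliveB A S := by
    intro i
    rw [count_rpA_pos_iff A S _ (by positivity), mem_aliveB_iff]
  rw [PySem.List.foldl_append_ite (p := fun i : Nat => 0 < count_element_in_table (rpA A S) ((i : Int) + 1))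
      (f := fun i : Nat => ships.getD i ""), List.nil_append]
  rw [PySem.List.enumerate_eq_map_pyRange ships "", PySem.List.len_eq,
    PySem.List.pyRange_zero_natCast, List.map_map, List.filter_map, List.map_map]
  have hfilter : (List.range ships.length).filter
        (fun i : Nat => decide (0 < count_element_in_table (rpA A S) ((i : Int) + 1)))
      = (List.range ships.length).filter
          ((fun q : Int × String => PySem.Set.contains (aliveB A S) (q.1 + 1)) ∘
            ((fun j : Int => (j, PySem.List.pyGetD ships j "")) ∘ (Nat.cast : Nat → Int))) := by
    apply List.filter_congr
    intro i _
    simp only [Function.comp]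
    rw [Bool.eq_iff_iff, decide_eq_true_iff, PySem.Set.contains_iff]
    exact hkey i
  rw [hfilter]
  apply List.map_congr_left
  intro i _
  simp only [Function.comp]
  rw [PySem.List.pyGetD_natCast]
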